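-- pv_equiv track=rewrite | github.com/arsalannkhann/OrionX | orionx/compiler/workflow_compiler.py | _find_reachable
-- ===== SOURCE A (Python) =====
-- from typing import Dict, List, Set, Optional, Tuple
-- from collections import deque
--
-- def _find_reachable(start: str, edges: List[Dict]) -> Set[str]:
--     """Find all nodes reachable from start using BFS."""
--     adjacency: Dict[str, List[str]] = {}
--     for edge in edges:
--         source = edge.get("source")
--         target = edge.get("target")
--         if source not in adjacency:
--             adjacency[source] = []
--         adjacency[source].append(target)
--
--     visited = {start}
--     queue = deque([start])
--
--     while queue:
--         node = queue.popleft()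
--         for neighbor in adjacency.get(node, []):
--             if neighbor not in visited:
--                 visited.add(neighbor)
--                 queue.append(neighbor)
--
--     return visited
-- ===== SOURCE B (Python) =====
-- def _find_reachable(start: str, edges):
--     """Find all nodes reachable from start: no adjacency index, no deque;
--     a cursor walks the growing queue list and every step scans the raw edge list."""
--     visited = {start}
--     queue = [start]
--     i = 0
--     while i < len(queue):
--         node = queue[i]
--         i += 1
--         for edge in edges:
--             if edge.get("source") == node:
--                 target = edge.get("target")
--                 if target not in visited:
--                     visited.add(target)
--                     queue.append(target)
--     return visited
-- ===== Notes on version B (the rewrite author's own statement) =====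
-- stated objective: alternative
-- what changed: B drops A's adjacency-dict preprocessing and deque entirely: a cursor walks the growing queue list and each visited node is expanded by rescanning the raw edge list for matching sources. Pre_ excludes exactly the inputs where a reachable node is the source of an edge dict lacking a 'target' key, on which the returned set contains None and so is not a value of the declared Set[str].
-- outside the precondition, e.g. on _find_reachable('a', [{'source': 'a'}]): A returns {None, 'a'}, B returns {None, 'a'}
import Mathlib
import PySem

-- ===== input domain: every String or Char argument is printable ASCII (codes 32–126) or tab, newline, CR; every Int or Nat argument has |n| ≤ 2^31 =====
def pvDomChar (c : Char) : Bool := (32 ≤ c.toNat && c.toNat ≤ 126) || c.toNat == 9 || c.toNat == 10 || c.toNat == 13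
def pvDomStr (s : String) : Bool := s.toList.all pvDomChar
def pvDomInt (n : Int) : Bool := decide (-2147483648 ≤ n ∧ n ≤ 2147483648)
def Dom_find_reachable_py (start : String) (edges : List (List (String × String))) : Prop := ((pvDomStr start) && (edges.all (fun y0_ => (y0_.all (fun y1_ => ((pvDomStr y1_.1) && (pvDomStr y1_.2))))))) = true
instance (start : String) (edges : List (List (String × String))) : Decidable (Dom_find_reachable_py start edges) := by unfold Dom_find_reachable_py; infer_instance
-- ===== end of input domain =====

-- B removes A's adjacency-dict preprocessing and deque: a cursor walks the growing
-- queue list and each node is expanded by rescanning the raw edge list (alternative, not faster).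


-- ===== PORT A =====
-- adjacency building loop: 'if source not in adjacency: adjacency[source] = []' followed by
-- 'adjacency[source].append(target)' is exactly Dict.modify source [] (· ++ [target])
def pvBuildAdj (edges : List (List (String × String))) : PySem.Dict (Option String) (List (Option String)) :=
  edges.foldl (fun adjacency edge =>
    PySem.Dict.modify adjacency (PySem.Dict.get? (PySem.Dict.mk edge) "source") []
      (fun l => l ++ [PySem.Dict.get? (PySem.Dict.mk edge) "target"])) PySem.Dict.empty

-- 'if neighbor not in visited: visited.add(neighbor); queue.append(neighbor)';
-- a 'none' neighbor (edge without "target" key) would add Python's None to a Set[str]: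
-- not representable as String, excluded by Pre_; the port skips it
def pvVisitStep (vq : PySem.Set String × List String) (neighbor : Option String) :
    PySem.Set String × List String :=
  match neighbor with
  | some t =>
      if PySem.Set.contains vq.1 t then vq else (PySem.Set.add vq.1 t, vq.2 ++ [t])
  | none => vq

-- the 'while queue' BFS loop; fuel = edges.length + 1 bounds the number of pops
-- (each queue entry after start corresponds to a distinct edge target), so the
-- recursion computes exactly the while loop
def pvBfsA (adj : PySem.Dict (Option String) (List (Option String))) :
    Nat → PySem.Set String → List String → PySem.Set String
  | 0, visited, _ => visited
  | _ + 1, visited, [] => visited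
  | fuel + 1, visited, node :: rest =>
      let s := (PySem.Dict.getD adj (some node) []).foldl pvVisitStep (visited, rest)
      pvBfsA adj fuel s.1 s.2

def find_reachable_py (start : String) (edges : List (List (String × String))) : List String :=
  pvBfsA (pvBuildAdj edges) (edges.length + 1) (PySem.Set.ofList [start]) [start]

-- ===== PORT B =====
-- 'while i < len(queue)': queue[i] via pyGet? (none exactly when i = len(queue), loop ends);
-- same fuel bound as A's port: at most one append per edge, so ≤ edges.length + 1 iterations;
-- a missing "target" key ('none') would add Python's None, excluded by Pre_, the port skips it
def pvBfsB (edges : List (List (String × String))) :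
    Nat → PySem.Set String → List String → Nat → PySem.Set String
  | 0, visited, _, _ => visited
  | fuel + 1, visited, queue, i =>
      match PySem.List.pyGet? queue (i : Int) with
      | none => visited
      | some node =>
          let s := edges.foldl (fun vq edge =>
            if PySem.Dict.get? (PySem.Dict.mk edge) "source" = some node then
              match PySem.Dict.get? (PySem.Dict.mk edge) "target" with
              | some target =>
                  if PySem.Set.contains vq.1 target then vq
                  else (PySem.Set.add vq.1 target, vq.2 ++ [target])
              | none => vq
            else vq) (visited, queue)
          pvBfsB edges fuel s.1 s.2 (i + 1)

def find_reachable_py_alt (start : String) (edges : List (List (String × String))) : List String :=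
  pvBfsB edges (edges.length + 1) (PySem.Set.ofList [start]) [start] 0

-- ===== PRECONDITION & SPEC =====
-- bounded closure of {start} under the fully-keyed edges (source and target both present):
-- the set of strings Python's BFS can visit; edges.length growth rounds reach the fixed point
def pvGrow (edges : List (List (String × String))) (S : List String) : List String :=
  PySem.Set.update S (edges.filterMap (fun e =>
    match PySem.Dict.get? (PySem.Dict.mk e) "source", PySem.Dict.get? (PySem.Dict.mk e) "target" with
    | some s, some t => if s ∈ S then some t else none
    | _, _ => none))

def pvReachable (start : String) (edges : List (List (String × String))) : List String :=
  (pvGrow edges)^[edges.length] [start]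

-- Pre_ excludes exactly the inputs on which the Python result is not a value of the declared
-- Set[str]: an edge with a "source" key but no "target" key whose source is reachable puts
-- None into the returned set (both Pythons still return, and return the same set, there)
def Pre_find_reachable_py (start : String) (edges : List (List (String × String))) : Prop :=
  edges.all (fun e =>
    match PySem.Dict.get? (PySem.Dict.mk e) "source", PySem.Dict.get? (PySem.Dict.mk e) "target" with
    | some s, none => decide (s ∉ pvReachable start edges)
    | _, _ => true) = true
instance (start : String) (edges : List (List (String × String))) : Decidable (Pre_find_reachable_py start edges) := by unfold Pre_find_reachable_py; infer_instance

def pvWitness_find_reachable_py : String × (List (List (String × String))) :=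
  ("a", [[("source", "a"), ("target", "b")], [("x", "y")]])

def Spec_find_reachable_py (start : String) (edges : List (List (String × String))) (out : List String) : Prop := out = find_reachable_py_alt start edges
instance (start : String) (edges : List (List (String × String))) (out : List String) : Decidable (Spec_find_reachable_py start edges out) := by unfold Spec_find_reachable_py; infer_instance

-- ===== CLAIM (what is proved, stated in full; the proofs are below) =====
def Claim_equal_find_reachable_py : Prop := ∀ (start : String) (edges : List (List (String × String))), Dom_find_reachable_py start edges → Pre_find_reachable_py start edges → Spec_find_reachable_py start edges (find_reachable_py start edges)

-- ===== LEMMAS AND PROOFS =====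

-- the per-node neighbor selection both algorithms share, as a function of one edge
def pvSel (k : Option String) (edge : List (String × String)) : Option (Option String) :=
  if PySem.Dict.get? (PySem.Dict.mk edge) "source" = k
  then some (PySem.Dict.get? (PySem.Dict.mk edge) "target") else none

-- A's adjacency lists are exactly the selected targets, in edge order
theorem pvAdj_getD (edges : List (List (String × String)))
    (d : PySem.Dict (Option String) (List (Option String))) (k : Option String) :
    PySem.Dict.getD (edges.foldl (fun adjacency edge =>
      PySem.Dict.modify adjacency (PySem.Dict.get? (PySem.Dict.mk edge) "source") []
        (fun l => l ++ [PySem.Dict.get? (PySem.Dict.mk edge) "target"])) d) k []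
      = PySem.Dict.getD d k [] ++ edges.filterMap (pvSel k) := by
  induction edges generalizing d with
  | nil => simp
  | cons e es ih =>
      simp only [List.foldl_cons, List.filterMap_cons, ih, PySem.Dict.getD_modify, pvSel]
      by_cases h : PySem.Dict.get? (PySem.Dict.mk e) "source" = k
      · simp [h, eq_comm]
      · have h' : ¬ k = PySem.Dict.get? (PySem.Dict.mk e) "source" := fun hh => h hh.symm
        simp [h, h']

-- B's edge scan is the fold of pvVisitStep over the selected targets
theorem pvScan_eq (node : String) (edges : List (List (String × String)))
    (init : PySem.Set String × List String) :
    edges.foldl (fun vq edge =>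
      if PySem.Dict.get? (PySem.Dict.mk edge) "source" = some node then
        match PySem.Dict.get? (PySem.Dict.mk edge) "target" with
        | some target =>
            if PySem.Set.contains vq.1 target then vq
            else (PySem.Set.add vq.1 target, vq.2 ++ [target])
        | none => vq
      else vq) init
    = (edges.filterMap (pvSel (some node))).foldl pvVisitStep init := by
  induction edges generalizing init with
  | nil => rfl
  | cons e es ih =>
      simp only [List.foldl_cons, List.filterMap_cons, pvSel]
      by_cases h : PySem.Dict.get? (PySem.Dict.mk e) "source" = some node
      · simp only [h]
        rw [ih]
        cases PySem.Dict.get? (PySem.Dict.mk e) "target" <;> rfl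
      · simp only [if_neg h]
        exact ih init

-- pvVisitStep only appends at the tail of the queue, so a fixed prefix passes through
theorem pvFold_prefix (L : List (Option String)) (v : PySem.Set String)
    (P q : List String) :
    L.foldl pvVisitStep (v, P ++ q)
      = ((L.foldl pvVisitStep (v, q)).1, P ++ (L.foldl pvVisitStep (v, q)).2) := by
  induction L generalizing v q with
  | nil => rfl
  | cons nb L ih =>
      simp only [List.foldl_cons]
      cases nb with
      | none => exact ih v q
      | some t =>
          simp only [pvVisitStep]
          by_cases h : PySem.Set.contains v t
          · rw [if_pos h, if_pos h]; exact ih v q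
          · rw [if_neg h, if_neg h]
            simpa [List.append_assoc] using ih (PySem.Set.add v t) (q ++ [t])

theorem pvQueue_get (done : List String) (node : String) (rest : List String) :
    PySem.List.pyGet? (done ++ node :: rest) ((done.length : Nat) : Int) = some node := by
  rw [PySem.List.pyGet?_natCast]
  simp

-- B's cursor walk over (processed ++ pending) simulates A's queue of pending nodes
theorem pvBfs_agree (edges : List (List (String × String))) (fuel : Nat) :
    ∀ (v : PySem.Set String) (done q : List String),
      pvBfsB edges fuel v (done ++ q) done.length
        = pvBfsA (pvBuildAdj edges) fuel v q := by
  induction fuel with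
  | zero => intro v done q; rfl
  | succ fuel ih =>
      intro v done q
      cases q with
      | nil =>
          have hnone : PySem.List.pyGet? (done ++ ([] : List String)) ((done.length : Nat) : Int) = none := by
            rw [PySem.List.pyGet?_natCast]
            simp
          rw [pvBfsB, hnone]
          simp [pvBfsA]
      | cons node rest =>
          show pvBfsB edges (fuel + 1) v (done ++ node :: rest) done.length = _
          rw [pvBfsB, pvQueue_get]
          simp only
          rw [pvScan_eq]
          have hadj : PySem.Dict.getD (pvBuildAdj edges) (some node) []
              = edges.filterMap (pvSel (some node)) := by
            have := pvAdj_getD edges PySem.Dict.empty (some node)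
            simpa [pvBuildAdj] using this
          have hsplit : done ++ node :: rest = (done ++ [node]) ++ rest := by simp
          rw [hsplit, pvFold_prefix]
          rw [pvBfsA, ← hadj]
          have hlen : done.length + 1 = (done ++ [node]).length := by simp
          rw [hlen, ih]

-- ===== VERDICT (by name: the statement is the Claim_ definition above) =====
theorem find_reachable_py_spec : Claim_equal_find_reachable_py := by
  intro start edges _ _
  show find_reachable_py start edges = find_reachable_py_alt start edges
  have h := pvBfs_agree edges (edges.length + 1) (PySem.Set.ofList [start]) [] [start]
  simpa [find_reachable_py, find_reachable_py_alt] using h.symm
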